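-- pv_equiv track=rewrite | github.com/azure1016/MyLeetcodePython | divide_spoils_fairly.py | divide_with_same_items
-- ===== SOURCE A (Python) =====
-- import collections
--
-- def divide_with_same_items(items):
--     m = len(items)
--     total = sum(items) // 2
--     Spoil = collections.namedtuple('Spoil',['num', 'val'])
--     dp = [[Spoil(0,0) for _ in range(total +1)] for _ in range(m+1)]
--     for i in range(1, m+1):
--         for j in reversed(range(1, total+1)):
--             if  j < items[i-1] or dp[i-1][j-items[i-1]].num >= m // 2 or dp[i-1][j].val >= dp[i-1][j - items[i-1]].val + items[i-1]:
--                 dp[i][j] = Spoil(dp[i-1][j].num, dp[i-1][j].val)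
--             else:
--                 dp[i][j] = Spoil(dp[i-1][j-items[i-1]].num + 1, dp[i-1][j-items[i-1]].val + items[i-1])
--     return dp[-1][-1].val
-- ===== SOURCE B (Python) =====
-- def divide_with_same_items(items):
--     half = len(items) // 2
--     memo = {}
--     def f(i, j):
--         if i == 0:
--             return (0, 0)
--         key = (i, j)
--         if key in memo:
--             return memo[key]
--         w = items[i - 1]
--         res = f(i - 1, j)
--         if w <= j:
--             pn, pv = f(i - 1, j - w)
--             if pn < half and res[1] < pv + w:
--                 res = (pn + 1, pv + w)
--         memo[key] = res
--         return res
--     return f(len(items), sum(items) // 2)[1]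
-- ===== Notes on version B (the rewrite author's own statement) =====
-- stated objective: alternative
-- what changed: Replaces A's bottom-up fill of the whole (m+1)x(total+1) namedtuple table with a top-down memoized recursion f(i, j) -> (num, val) over (item index, remaining capacity) that computes only the states reachable from (m, total).
-- outside the precondition, e.g. on divide_with_same_items([-1, 1]): A returns 0, B returns 0
import Mathlib
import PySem

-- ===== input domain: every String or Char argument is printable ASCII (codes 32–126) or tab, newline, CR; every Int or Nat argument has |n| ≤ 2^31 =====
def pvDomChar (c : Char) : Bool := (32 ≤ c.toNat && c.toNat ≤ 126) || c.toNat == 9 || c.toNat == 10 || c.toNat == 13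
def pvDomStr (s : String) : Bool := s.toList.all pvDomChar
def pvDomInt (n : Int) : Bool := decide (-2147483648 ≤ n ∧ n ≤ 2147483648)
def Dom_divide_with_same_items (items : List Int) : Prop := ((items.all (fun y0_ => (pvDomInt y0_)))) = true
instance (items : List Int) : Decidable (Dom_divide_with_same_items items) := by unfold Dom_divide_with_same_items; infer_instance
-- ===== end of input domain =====

-- B replaces A's bottom-up (m+1)x(total+1) table with a top-down memoized recursion
-- f(i, j) -> (num, val) over (index, remaining capacity) that only visits reachable states
-- (objective: alternative; the claim is about the return value).

-- ===== PORT A =====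
-- one cell of A's table: the condition chain of A's inner `if`, in source order
def pvACell (half w : Int) (prev : List (Int × Int)) (j : Int) : Int × Int :=
  if j < w then PySem.List.pyGetD prev j (0, 0)
  else if (PySem.List.pyGetD prev (j - w) (0, 0)).1 ≥ half then PySem.List.pyGetD prev j (0, 0)
  else if (PySem.List.pyGetD prev j (0, 0)).2 ≥ (PySem.List.pyGetD prev (j - w) (0, 0)).2 + w then
    PySem.List.pyGetD prev j (0, 0)
  else ((PySem.List.pyGetD prev (j - w) (0, 0)).1 + 1, (PySem.List.pyGetD prev (j - w) (0, 0)).2 + w)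

-- A's inner loop `for j in reversed(range(1, total+1))`: dp[i][j] = ... (a 2-level list write)
def pvAInner (items : List Int) (m total i : Int) (dp : List (List (Int × Int))) :
    List (List (Int × Int)) :=
  ((PySem.List.pyRange 1 (total + 1) 1).reverse).foldl (fun dp j =>
    let w := PySem.List.pyGetD items (i - 1) 0
    let prev := PySem.List.pyGetD dp (i - 1) []
    PySem.List.pySetD dp i
      (PySem.List.pySetD (PySem.List.pyGetD dp i []) j (pvACell (PySem.Int.floordiv m 2) w prev j)))
    dp

def divide_with_same_items (items : List Int) : Int :=
  let m : Int := PySem.List.len items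
  let total : Int := PySem.Int.floordiv items.sum 2
  let dp0 : List (List (Int × Int)) :=
    (PySem.List.pyRange 0 (m + 1) 1).map (fun _ =>
      (PySem.List.pyRange 0 (total + 1) 1).map (fun _ => ((0 : Int), (0 : Int))))
  let dp := (PySem.List.pyRange 1 (m + 1) 1).foldl (fun dp i => pvAInner items m total i dp) dp0
  (PySem.List.pyGetD (PySem.List.pyGetD dp (-1) []) (-1) (0, 0)).2

-- ===== PORT B =====
-- B's helper f(i, j): memoized top-down recursion threading the memo dict through the calls;
-- the Lean recursion is structural on i (Python's i is this Nat's int value)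
def pvBf (items : List Int) (half : Int) :
    Nat → Int → PySem.Dict (Int × Int) (Int × Int) →
      ((Int × Int) × PySem.Dict (Int × Int) (Int × Int))
  | 0, _, memo => ((0, 0), memo)
  | i + 1, j, memo =>
    match memo.get? (((i : Int) + 1), j) with
    | some v => (v, memo)
    | none =>
      let w := PySem.List.pyGetD items (((i : Int) + 1) - 1) 0
      let s := pvBf items half i j memo
      let r :=
        if w ≤ j then
          let p := pvBf items half i (j - w) s.2
          if p.1.1 < half ∧ s.1.2 < p.1.2 + w then ((p.1.1 + 1, p.1.2 + w), p.2)
          else (s.1, p.2)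
        else s
      (r.1, r.2.insert (((i : Int) + 1), j) r.1)

def divide_with_same_items_alt (items : List Int) : Int :=
  let half : Int := PySem.Int.floordiv (PySem.List.len items) 2
  (pvBf items half items.length (PySem.Int.floordiv items.sum 2) PySem.Dict.empty).1.2

-- ===== PRECONDITION & SPEC =====
-- Pre_ excludes lists containing a negative item: on nearly all of them A raises IndexError
-- (table index j-item out of range, or an empty table when sum//2 < 0); on the rare negative
-- inputs where A still returns, the equivalence is simply not claimed.
def Pre_divide_with_same_items (items : List Int) : Prop := ∀ x ∈ items, 0 ≤ x
instance (items : List Int) : Decidable (Pre_divide_with_same_items items) := by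
  unfold Pre_divide_with_same_items; infer_instance
def pvWitness_divide_with_same_items : List Int := [2, 3, 4]

def Spec_divide_with_same_items (items : List Int) (out : Int) : Prop :=
  out = divide_with_same_items_alt items
instance (items : List Int) (out : Int) : Decidable (Spec_divide_with_same_items items out) := by
  unfold Spec_divide_with_same_items; infer_instance

-- ===== CLAIM (what is proved, stated in full; the proofs are below) =====
def Claim_equal_divide_with_same_items : Prop := ∀ (items : List Int),
  Dom_divide_with_same_items items → Pre_divide_with_same_items items →
  Spec_divide_with_same_items items (divide_with_same_items items)

-- ===== LEMMAS AND PROOFS =====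

-- the common specification of one DP row update, indexed by Nat positions
def pvCell (half w : Int) (r : List (Int × Int)) (j : Nat) : Int × Int :=
  if j = 0 then (0, 0)
  else if (j : Int) < w then r.getD j (0, 0)
  else
    let p := r.getD ((j : Int) - w).toNat (0, 0)
    if half ≤ p.1 then r.getD j (0, 0)
    else if p.2 + w ≤ (r.getD j (0, 0)).2 then r.getD j (0, 0)
    else (p.1 + 1, p.2 + w)

def pvRow (half w : Int) (r : List (Int × Int)) : List (Int × Int) :=
  (List.range r.length).map (pvCell half w r)

def pvRowsL (half : Int) (l : List Int) (r : List (Int × Int)) : List (Int × Int) :=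
  l.foldl (fun r w => pvRow half w r) r

-- the partially written row i of A's inner loop: positions ≤ b still (0,0), positions > b written
def pvMixA (half w : Int) (prev : List (Int × Int)) (L : Nat) (b : Int) : List (Int × Int) :=
  (List.range L).map (fun (j : Nat) => if (j : Int) ≤ b then (0, 0) else pvCell half w prev j)

-- A's table after k outer iterations
def pvS (half : Int) (items : List Int) (z : List (Int × Int)) (k : Nat) :
    List (List (Int × Int)) :=
  (List.range (items.length + 1)).map
    (fun t => if t ≤ k then pvRowsL half (items.take t) z else z)

theorem pvRow_length (half w : Int) (r : List (Int × Int)) :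
    (pvRow half w r).length = r.length := by
  simp [pvRow]

theorem pvRow_getD0 (half w : Int) (r : List (Int × Int)) :
    (pvRow half w r).getD 0 (0, 0) = (0, 0) := by
  cases r with
  | nil => simp [pvRow]
  | cons a t =>
      rw [List.getD_eq_getElem _ _ (by simp [pvRow])]
      simp [pvRow, pvCell]

theorem pvRowsL_length (half : Int) (l : List Int) (r : List (Int × Int)) :
    (pvRowsL half l r).length = r.length := by
  induction l generalizing r with
  | nil => rfl
  | cons w t ih => simpa [pvRowsL, List.foldl_cons, pvRow_length] using
      (ih (pvRow half w r)).trans (pvRow_length half w r)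

theorem pvRowsL_getD0 (half : Int) (l : List Int) (r : List (Int × Int))
    (h0 : r.getD 0 (0, 0) = (0, 0)) : (pvRowsL half l r).getD 0 (0, 0) = (0, 0) := by
  induction l generalizing r with
  | nil => exact h0
  | cons w t ih => exact ih (pvRow half w r) (pvRow_getD0 half w r)

theorem pvACell_eq (half w : Int) (prev : List (Int × Int)) (b : Int) (hb : 0 < b) (hw : 0 ≤ w) :
    pvACell half w prev b = pvCell half w prev b.toNat := by
  have hcast : ((b.toNat : Nat) : Int) = b := Int.toNat_of_nonneg (by omega)
  have hg : ∀ (i : Int), 0 ≤ i → PySem.List.pyGetD prev i (0, 0) = prev.getD i.toNat (0, 0) := by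
    intro i hi
    rw [← Int.toNat_of_nonneg hi, PySem.List.pyGetD_natCast, Int.toNat_natCast]
  rw [pvACell, pvCell, if_neg (show ¬ b.toNat = 0 by omega)]
  by_cases h1 : b < w
  · rw [if_pos h1, if_pos (show ((b.toNat : Nat) : Int) < w by omega), hg b (by omega)]
  · rw [if_neg h1, if_neg (show ¬ ((b.toNat : Nat) : Int) < w by omega)]
    have hidx : (((b.toNat : Nat) : Int) - w).toNat = (b - w).toNat := by omega
    simp only [hg b (by omega), hg (b - w) (by omega), hidx]

theorem pvMixA_set (half w : Int) (prev : List (Int × Int)) (L : Nat) (b : Int) (hb0 : 0 ≤ b)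
    (hb : b < (L : Int)) :
    (pvMixA half w prev L b).set b.toNat (pvCell half w prev b.toNat) =
      pvMixA half w prev L (b - 1) := by
  apply List.ext_getElem (by simp [pvMixA])
  intro j h1 h2
  have hj : j < L := by simpa [pvMixA] using h2
  by_cases hje : (j : Int) = b
  · have : j = b.toNat := by omega
    subst this
    rw [List.getElem_set_self (by simpa [pvMixA] using hj)]
    simp only [pvMixA, List.getElem_map, List.getElem_range]
    rw [if_neg (by omega)]
  · rw [List.getElem_set_ne (by omega)]
    simp only [pvMixA, List.getElem_map, List.getElem_range]
    by_cases hle : (j : Int) ≤ b - 1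
    · rw [if_pos (by omega), if_pos hle]
    · rw [if_neg (by omega), if_neg hle]

theorem pvS_length (half : Int) (items : List Int) (z : List (Int × Int)) (k : Nat) :
    (pvS half items z k).length = items.length + 1 := by
  simp [pvS]

theorem pvS_getElem (half : Int) (items : List Int) (z : List (Int × Int)) (k t : Nat)
    (ht : t < items.length + 1) :
    (pvS half items z k)[t]'(by simp [pvS]; omega) =
      if t ≤ k then pvRowsL half (items.take t) z else z := by
  simp [pvS]

theorem pvA_loop (items : List Int) (m total half w : Int)
    (hhalf : half = PySem.Int.floordiv m 2) (k : Nat)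
    (dpb : List (List (Int × Int))) (prev : List (Int × Int)) (L : Nat)
    (hdpb_len : dpb.length = items.length + 1) (hk : k < items.length)
    (hprev : dpb.getD k [] = prev)
    (hw : PySem.List.pyGetD items (((k : Int) + 1) - 1) 0 = w) (hw0 : 0 ≤ w)
    (hL : prev.length = L)
    (n : Nat) (hn : (n : Int) ≤ (L : Int) - 1) :
    (PySem.List.pyRange (n : Int) 0 (-1)).foldl (fun dp j =>
      let w' := PySem.List.pyGetD items (((k : Int) + 1) - 1) 0
      let prev' := PySem.List.pyGetD dp (((k : Int) + 1) - 1) []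
      PySem.List.pySetD dp ((k : Int) + 1)
        (PySem.List.pySetD (PySem.List.pyGetD dp ((k : Int) + 1) []) j
          (pvACell (PySem.Int.floordiv m 2) w' prev' j)))
      (dpb.set (k + 1) (pvMixA half w prev L (n : Int))) =
      dpb.set (k + 1) (pvMixA half w prev L 0) := by
  induction n with
  | zero =>
      rw [PySem.List.pyRange_neg_one_eq_nil (by omega)]
      simp
  | succ q ih =>
      rw [show ((q + 1 : Nat) : Int) = (q : Int) + 1 by push_cast; ring]
      rw [PySem.List.pyRange_neg_one_cons (by omega), List.foldl_cons]
      have hk1 : k + 1 < dpb.length := by omega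
      set D := dpb.set (k + 1) (pvMixA half w prev L ((q : Int) + 1)) with hD
      have harith : ((k : Int) + 1) - 1 = (k : Int) := by ring
      have hprev' : PySem.List.pyGetD D (((k : Int) + 1) - 1) [] = prev := by
        rw [harith, PySem.List.pyGetD_natCast, hD]
        rw [List.getD_eq_getElem _ _ (by rw [List.length_set]; omega)]
        rw [List.getElem_set_ne (by omega)]
        rw [List.getD_eq_getElem _ _ (by omega)] at hprev
        exact hprev
      have hcur : PySem.List.pyGetD D ((k : Int) + 1) [] = pvMixA half w prev L ((q : Int) + 1) := by
        rw [show ((k : Int) + 1) = ((k + 1 : Nat) : Int) by push_cast; ring, PySem.List.pyGetD_natCast, hD]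
        rw [List.getD_eq_getElem _ _ (by rw [List.length_set]; omega)]
        rw [List.getElem_set_self (by rw [List.length_set]; omega)]
      have hstep : (let w' := PySem.List.pyGetD items (((k : Int) + 1) - 1) 0
          let prev' := PySem.List.pyGetD D (((k : Int) + 1) - 1) []
          PySem.List.pySetD D ((k : Int) + 1)
            (PySem.List.pySetD (PySem.List.pyGetD D ((k : Int) + 1) []) ((q : Int) + 1)
              (pvACell (PySem.Int.floordiv m 2) w' prev' ((q : Int) + 1)))) =
          dpb.set (k + 1) (pvMixA half w prev L (q : Int)) := by
        simp only [hw, hprev', hcur]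
        rw [show pvACell (PySem.Int.floordiv m 2) w prev ((q : Int) + 1) =
              pvCell half w prev ((q : Int) + 1).toNat from
            by rw [← hhalf]; exact pvACell_eq half w prev ((q : Int) + 1) (by omega) hw0]
        rw [PySem.List.pySetD_of_nonneg _ _ (by omega : (0 : Int) ≤ (q : Int) + 1)]
        rw [pvMixA_set half w prev L ((q : Int) + 1) (by omega) (by omega)]
        rw [PySem.List.pySetD_of_nonneg _ _ (by omega : (0 : Int) ≤ (k : Int) + 1)]
        rw [show ((k : Int) + 1).toNat = k + 1 by omega, hD, List.set_set]
        rw [show (q : Int) + 1 - 1 = (q : Int) by ring]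
      rw [hstep, show (q : Int) + 1 - 1 = (q : Int) by ring]
      exact ih (by omega)

theorem pvA_inner_eq (items : List Int) (m total half : Int)
    (hhalf : half = PySem.Int.floordiv m 2) (k : Nat) (hk : k < items.length)
    (z : List (Int × Int)) (hz : z = List.replicate (total + 1).toNat (0, 0))
    (w : Int) (hw : items.getD k 0 = w) (hw0 : 0 ≤ w) (ht : 0 ≤ total) :
    pvAInner items m total ((k : Int) + 1) (pvS half items z k) = pvS half items z (k + 1) := by
  have hzlen : z.length = (total + 1).toNat := by rw [hz]; simp
  set L := (total + 1).toNat with hLdef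
  set prev := pvRowsL half (items.take k) z with hprevdef
  have hprevlen : prev.length = L := by rw [hprevdef, pvRowsL_length, hzlen]
  have hplen : (pvS half items z k).length = items.length + 1 := pvS_length half items z k
  have hwpy : PySem.List.pyGetD items (((k : Int) + 1) - 1) 0 = w := by
    rw [show ((k : Int) + 1) - 1 = ((k : Nat) : Int) by ring, PySem.List.pyGetD_natCast]
    exact hw
  have hprevS : (pvS half items z k).getD k [] = prev := by
    rw [List.getD_eq_getElem _ _ (by omega), pvS_getElem half items z k k (by omega), if_pos le_rfl]
  have hmixtot : pvMixA half w prev L total = z := by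
    rw [hz]
    apply List.ext_getElem (by simp [pvMixA, hLdef])
    intro j h1 h2
    have hj : j < L := by simpa [pvMixA] using h1
    simp only [pvMixA, List.getElem_map, List.getElem_range, List.getElem_replicate]
    rw [if_pos (by omega)]
  have hsetz : (pvS half items z k).set (k + 1) z = pvS half items z k := by
    apply List.ext_getElem (by simp)
    intro t h1 h2
    have htl : t < items.length + 1 := by simpa [pvS] using h2
    by_cases hte : t = k + 1
    · subst hte
      rw [List.getElem_set_self (by omega)]
      rw [pvS_getElem half items z k (k + 1) htl, if_neg (by omega)]
    · rw [List.getElem_set_ne (by omega)]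
  have hmix0 : pvMixA half w prev L 0 = pvRow half w prev := by
    apply List.ext_getElem (by simp [pvMixA, pvRow, hprevlen])
    intro j h1 h2
    have hj : j < L := by simpa [pvMixA] using h1
    simp only [pvMixA, pvRow, List.getElem_map, List.getElem_range]
    by_cases hj0 : j = 0
    · subst hj0; rw [if_pos (by omega), pvCell, if_pos rfl]
    · rw [if_neg (by omega)]
  have hfinal : (pvS half items z k).set (k + 1) (pvRow half w prev) = pvS half items z (k + 1) := by
    apply List.ext_getElem (by simp [pvS])
    intro t h1 h2
    have htl : t < items.length + 1 := by simpa [pvS] using h2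
    by_cases hte : t = k + 1
    · subst hte
      rw [List.getElem_set_self (by omega)]
      rw [pvS_getElem half items z (k + 1) (k + 1) htl, if_pos le_rfl]
      have htake : items.take (k + 1) = items.take k ++ [items[k]'hk] := by
        rw [← List.take_concat_get' items k hk]
      rw [htake, hprevdef, pvRowsL, pvRowsL, List.foldl_append, List.foldl_cons, List.foldl_nil]
      congr 1
      rw [← hw, List.getD_eq_getElem _ _ hk]
    · rw [List.getElem_set_ne (by omega)]
      rw [pvS_getElem half items z k t htl, pvS_getElem half items z (k + 1) t htl]
      by_cases htk : t ≤ k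
      · rw [if_pos htk, if_pos (by omega)]
      · rw [if_neg htk, if_neg (by omega)]
  rw [pvAInner]
  rw [show (PySem.List.pyRange 1 (total + 1)).reverse = PySem.List.pyRange total 0 (-1) from
        by simpa using (PySem.List.pyRange_neg_one_eq_reverse total 0).symm]
  have hloop := pvA_loop items m total half w hhalf k (pvS half items z k) prev L hplen hk
    hprevS hwpy hw0 hprevlen total.toNat (by omega)
  rw [Int.toNat_of_nonneg ht] at hloop
  rw [hmixtot, hsetz, hmix0, hfinal] at hloop
  exact hloop

theorem pvA_outer (items : List Int) (m total half : Int) (hm : m = (items.length : Int))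
    (hhalf : half = PySem.Int.floordiv m 2) (z : List (Int × Int))
    (hz : z = List.replicate (total + 1).toNat (0, 0)) (ht : 0 ≤ total)
    (hpre : ∀ x ∈ items, 0 ≤ x) (k : Nat) (hk : k ≤ items.length) :
    (PySem.List.pyRange 1 ((k : Int) + 1) 1).foldl (fun dp i => pvAInner items m total i dp)
        (List.replicate (items.length + 1) z) = pvS half items z k := by
  induction k with
  | zero =>
      rw [show ((0 : Nat) : Int) + 1 = 1 by norm_num, PySem.List.pyRange_one_eq_nil le_rfl,
        List.foldl_nil]
      apply List.ext_getElem (by simp [pvS])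
      intro t h1 h2
      have htl : t < items.length + 1 := by simpa using h1
      rw [List.getElem_replicate, pvS_getElem half items z 0 t htl]
      by_cases ht0 : t = 0
      · subst ht0; rw [if_pos le_rfl]; rfl
      · rw [if_neg (by omega)]
  | succ k ih =>
      have hk' : k < items.length := by omega
      rw [show ((k + 1 : Nat) : Int) + 1 = ((k : Int) + 1) + 1 by push_cast; ring]
      rw [PySem.List.pyRange_one_succ_right (by omega), List.foldl_append, ih (by omega),
        List.foldl_cons, List.foldl_nil]
      exact pvA_inner_eq items m total half hhalf k hk' z hz (items.getD k 0) rfl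
        (hpre (items.getD k 0) (by rw [List.getD_eq_getElem _ _ hk']; exact List.getElem_mem hk'))
        ht

def pvTotal (items : List Int) : Int := PySem.Int.floordiv items.sum 2
def pvHalf (items : List Int) : Int := PySem.Int.floordiv (PySem.List.len items) 2
def pvZ (items : List Int) : List (Int × Int) := List.replicate (pvTotal items + 1).toNat (0, 0)
def pvFinal (items : List Int) : List (Int × Int) := pvRowsL (pvHalf items) items (pvZ items)

theorem pvTotal_nonneg (items : List Int) (hpre : ∀ x ∈ items, 0 ≤ x) : 0 ≤ pvTotal items := by
  have hsum : 0 ≤ items.sum := List.sum_nonneg hpre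
  rw [pvTotal, PySem.Int.floordiv_eq_ediv_of_pos (by norm_num)]
  exact Int.ediv_nonneg hsum (by norm_num)

theorem pvZ_getD0 (items : List Int) (hpre : ∀ x ∈ items, 0 ≤ x) :
    (pvZ items).getD 0 (0, 0) = (0, 0) := by
  have := pvTotal_nonneg items hpre
  rw [pvZ, List.getD_eq_getElem _ _ (by simp; omega), List.getElem_replicate]

-- ===== B-side proofs: the memoized recursion computes the memo-free recursion pvG, and pvG is A's table =====

-- the memo-free value of B's recursion
def pvG (items : List Int) (half : Int) : Nat → Int → Int × Int
  | 0, _ => (0, 0)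
  | i + 1, j =>
    let w := PySem.List.pyGetD items (((i : Int) + 1) - 1) 0
    let s := pvG items half i j
    if w ≤ j then
      let p := pvG items half i (j - w)
      if p.1 < half ∧ s.2 < p.2 + w then (p.1 + 1, p.2 + w) else s
    else s

-- the memo only ever holds correct values
def pvGood (items : List Int) (half : Int) (memo : PySem.Dict (Int × Int) (Int × Int)) : Prop :=
  ∀ k v, memo.get? k = some v → v = pvG items half k.1.toNat k.2

theorem pvGood_empty (items : List Int) (half : Int) :
    pvGood items half PySem.Dict.empty := by
  intro k v h
  rw [PySem.Dict.get?_empty] at h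
  exact absurd h (by simp)

theorem pvBf_correct (items : List Int) (half : Int) (i : Nat) :
    ∀ (j : Int) (memo : PySem.Dict (Int × Int) (Int × Int)), pvGood items half memo →
      (pvBf items half i j memo).1 = pvG items half i j ∧
      pvGood items half (pvBf items half i j memo).2 := by
  induction i with
  | zero => intro j memo hg; exact ⟨rfl, hg⟩
  | succ i ih =>
      intro j memo hg
      rw [pvBf, pvG]
      cases hmk : memo.get? (((i : Int) + 1), j) with
      | some v =>
          refine ⟨?_, hg⟩
          have := hg _ _ hmk
          simp only at this
          rw [this]
          rw [show ((i : Int) + 1).toNat = i + 1 by omega]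
          rw [pvG]
      | none =>
          simp only
          obtain ⟨hs1, hs2⟩ := ih j memo hg
          by_cases hw : PySem.List.pyGetD items (((i : Int) + 1) - 1) 0 ≤ j
          · obtain ⟨hp1, hp2⟩ := ih (j - PySem.List.pyGetD items (((i : Int) + 1) - 1) 0)
              (pvBf items half i j memo).2 hs2
            rw [if_pos hw, if_pos hw, hs1, hp1]
            by_cases hc : (pvG items half i (j - PySem.List.pyGetD items (((i : Int) + 1) - 1) 0)).1 < half ∧
                (pvG items half i j).2 < (pvG items half i (j - PySem.List.pyGetD items (((i : Int) + 1) - 1) 0)).2 + PySem.List.pyGetD items (((i : Int) + 1) - 1) 0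
            · rw [if_pos hc, if_pos hc]
              refine ⟨rfl, ?_⟩
              intro k v hkv
              rw [PySem.Dict.get?_insert] at hkv
              split_ifs at hkv with hk
              · subst hk
                simp only at hkv ⊢
                cases hkv
                rw [show ((i : Int) + 1).toNat = i + 1 by omega, pvG]
                simp only
                rw [if_pos hw, if_pos hc]
              · exact hp2 _ _ hkv
            · rw [if_neg hc, if_neg hc]
              refine ⟨rfl, ?_⟩
              intro k v hkv
              rw [PySem.Dict.get?_insert] at hkv
              split_ifs at hkv with hk
              · subst hk
                simp only at hkv ⊢
                cases hkv
                rw [show ((i : Int) + 1).toNat = i + 1 by omega, pvG]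
                simp only
                rw [if_pos hw, if_neg hc]
              · exact hp2 _ _ hkv
          · rw [if_neg hw, if_neg hw, hs1]
            refine ⟨rfl, ?_⟩
            intro k v hkv
            rw [PySem.Dict.get?_insert] at hkv
            split_ifs at hkv with hk
            · subst hk
              simp only at hkv ⊢
              cases hkv
              rw [show ((i : Int) + 1).toNat = i + 1 by omega, pvG]
              simp only
              rw [if_neg hw]
            · exact hs2 _ _ hkv

-- pvG i j is cell j of A's row i, for capacities 0 ≤ j ≤ total
theorem pvG_row (items : List Int) (hpre : ∀ x ∈ items, 0 ≤ x) (i : Nat)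
    (hi : i ≤ items.length) (j : Int) (hj0 : 0 ≤ j) (hjt : j ≤ pvTotal items) :
    pvG items (pvHalf items) i j =
      (pvRowsL (pvHalf items) (items.take i) (pvZ items)).getD j.toNat (0, 0) := by
  induction i generalizing j with
  | zero =>
      have ht := pvTotal_nonneg items hpre
      rw [pvG, List.take_zero, pvRowsL, List.foldl_nil, pvZ,
        List.getD_eq_getElem _ _ (by simp; omega), List.getElem_replicate]
  | succ i ih =>
      have ht := pvTotal_nonneg items hpre
      have hi' : i < items.length := by omega
      set w := items.getD i 0 with hwdef
      have hw0 : 0 ≤ w := hpre _ (by rw [hwdef, List.getD_eq_getElem _ _ hi']; exact List.getElem_mem hi')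
      have hwpy : PySem.List.pyGetD items (((i : Int) + 1) - 1) 0 = w := by
        rw [show ((i : Int) + 1) - 1 = ((i : Nat) : Int) by ring, PySem.List.pyGetD_natCast, hwdef]
      set prev := pvRowsL (pvHalf items) (items.take i) (pvZ items) with hprevdef
      have hprevlen : prev.length = (pvTotal items + 1).toNat := by
        rw [hprevdef, pvRowsL_length]; simp [pvZ]
      have hprev0 : prev.getD 0 (0, 0) = (0, 0) :=
        pvRowsL_getD0 _ _ _ (pvZ_getD0 items hpre)
      have hnext : pvRowsL (pvHalf items) (items.take (i + 1)) (pvZ items) =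
          pvRow (pvHalf items) w prev := by
        rw [← List.take_concat_get' items i hi', pvRowsL, List.foldl_append, List.foldl_cons,
          List.foldl_nil, hprevdef, pvRowsL]
        congr 1
        rw [hwdef, List.getD_eq_getElem _ _ hi']
      rw [hnext]
      have hjlt : j.toNat < prev.length := by rw [hprevlen]; omega
      have hrow : (pvRow (pvHalf items) w prev).getD j.toNat (0, 0) =
          pvCell (pvHalf items) w prev j.toNat := by
        rw [List.getD_eq_getElem _ _ (by rw [pvRow_length]; exact hjlt)]
        simp [pvRow]
      rw [hrow, pvG]
      simp only [hwpy]
      have hsk : pvG items (pvHalf items) i j = prev.getD j.toNat (0, 0) := ih (by omega) j hj0 hjt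
      by_cases hj0' : j = 0
      · subst hj0'
        have hR : pvCell (pvHalf items) w prev (Int.toNat 0) = (0, 0) := by
          rw [pvCell, if_pos (by decide)]
        rw [hR]
        have hs : pvG items (pvHalf items) i 0 = (0, 0) := by
          have h := ih (by omega) 0 le_rfl ht
          simp only [Int.toNat_zero] at h
          rwa [hprev0] at h
        by_cases hw : w ≤ 0
        · have hw' : w = 0 := le_antisymm hw hw0
          rw [if_pos hw]
          have hp : pvG items (pvHalf items) i (0 - w) = (0, 0) := by
            rw [hw']; simpa using hs
          rw [hp, hs, hw']
          rw [if_neg (by simp)]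
        · rw [if_neg hw]
          exact hs
      · rw [pvCell, if_neg (show ¬ j.toNat = 0 by omega)]
        have hcast : ((j.toNat : Nat) : Int) = j := Int.toNat_of_nonneg hj0
        by_cases hwj : w ≤ j
        · have hp : pvG items (pvHalf items) i (j - w) = prev.getD (j - w).toNat (0, 0) :=
            ih (by omega) (j - w) (by omega) (by omega)
          rw [if_pos hwj, if_neg (show ¬ ((j.toNat : Nat) : Int) < w by omega)]
          rw [hp, hsk]
          have hidx : (((j.toNat : Nat) : Int) - w).toNat = (j - w).toNat := by omega
          rw [hidx]
          set p := prev.getD (j - w).toNat (0, 0)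
          set cur := prev.getD j.toNat (0, 0)
          by_cases h1 : pvHalf items ≤ p.1
          · rw [if_pos h1, if_neg (by rw [not_and_or]; left; omega)]
          · rw [if_neg h1]
            by_cases h2 : p.2 + w ≤ cur.2
            · rw [if_pos h2, if_neg (by rw [not_and_or]; right; omega)]
            · rw [if_neg h2, if_pos ⟨by omega, by omega⟩]
        · rw [if_neg hwj, if_pos (show ((j.toNat : Nat) : Int) < w by omega), hsk]

theorem pvB_val (items : List Int) (hpre : ∀ x ∈ items, 0 ≤ x) :
    divide_with_same_items_alt items =
      (PySem.List.pyGetD (pvFinal items) (-1) (0, 0)).2 := by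
  have ht := pvTotal_nonneg items hpre
  simp only [divide_with_same_items_alt]
  have hcor := (pvBf_correct items (pvHalf items) items.length (PySem.Int.floordiv items.sum 2)
    PySem.Dict.empty (pvGood_empty _ _)).1
  rw [show PySem.Int.floordiv (PySem.List.len items) 2 = pvHalf items from rfl, hcor]
  rw [show PySem.Int.floordiv items.sum 2 = pvTotal items from rfl]
  rw [pvG_row items hpre items.length le_rfl (pvTotal items) ht le_rfl, List.take_length]
  have hlen : (pvFinal items).length = (pvTotal items + 1).toNat := by
    rw [pvFinal, pvRowsL_length]; simp [pvZ]
  have hne : pvFinal items ≠ [] := by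
    intro h; rw [h] at hlen; simp at hlen; omega
  rw [show pvRowsL (pvHalf items) items (pvZ items) = pvFinal items from rfl]
  rw [PySem.List.pyGetD_neg_one _ _ hne, List.getLast_eq_getElem]
  rw [List.getD_eq_getElem _ _ (by rw [hlen]; omega)]
  congr 2
  rw [hlen]
  omega

theorem pvA_val (items : List Int) (hpre : ∀ x ∈ items, 0 ≤ x) :
    divide_with_same_items items =
      (PySem.List.pyGetD (pvFinal items) (-1) (0, 0)).2 := by
  have ht := pvTotal_nonneg items hpre
  have hm : PySem.List.len items = (items.length : Int) := by simp
  simp only [divide_with_same_items]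
  rw [show (PySem.List.pyRange 0 (PySem.Int.floordiv items.sum 2 + 1) 1).map
        (fun _ => ((0 : Int), (0 : Int))) = pvZ items from by
      rw [List.map_const', PySem.List.length_pyRange_one, pvZ, pvTotal]
      norm_num]
  rw [show (PySem.List.pyRange 0 (PySem.List.len items + 1) 1).map (fun _ => pvZ items) =
        List.replicate (items.length + 1) (pvZ items) from by
      rw [List.map_const', PySem.List.length_pyRange_one, hm]
      norm_num]
  rw [show PySem.List.pyRange 1 (PySem.List.len items + 1) 1 =
        PySem.List.pyRange 1 ((items.length : Int) + 1) 1 from by rw [hm]]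
  rw [pvA_outer items (PySem.List.len items) (PySem.Int.floordiv items.sum 2)
        (pvHalf items) hm rfl (pvZ items) rfl ht hpre items.length le_rfl]
  have hSlen : (pvS (pvHalf items) items (pvZ items) items.length).length = items.length + 1 :=
    pvS_length _ _ _ _
  have hSne : pvS (pvHalf items) items (pvZ items) items.length ≠ [] := by
    intro h
    rw [h] at hSlen
    simp at hSlen
  rw [PySem.List.pyGetD_neg_one _ _ hSne, List.getLast_eq_getElem]
  have hidx : (pvS (pvHalf items) items (pvZ items) items.length).length - 1 = items.length := by
    omega
  rw [show (pvS (pvHalf items) items (pvZ items) items.length)[(pvS (pvHalf items) items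
        (pvZ items) items.length).length - 1]'(by omega) = pvFinal items from by
      have hstep : (pvS (pvHalf items) items (pvZ items) items.length)[(pvS (pvHalf items)
          items (pvZ items) items.length).length - 1]'(by omega) =
          (pvS (pvHalf items) items (pvZ items) items.length)[items.length]'(by omega) := by
        congr 1
      rw [hstep, pvS_getElem (pvHalf items) items (pvZ items) items.length items.length
        (by omega), if_pos le_rfl, List.take_length]
      rfl]

-- ===== VERDICT =====
theorem divide_with_same_items_spec : Claim_equal_divide_with_same_items := by
  intro items _hdom hpre
  unfold Spec_divide_with_same_items
  rw [pvA_val items hpre, pvB_val items hpre]
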